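-- pv_equiv track=rewrite | github.com/ai-za-z/Python | PYC22H-SQUARE-OUT-IT.PY | square_it_out
-- ===== SOURCE A (Python) =====
-- def square_it_out(start, end):
--     squares = []
--     even_squares = []
--     odd_squares = []
--
--     for num in range(start, end + 1):
--         square = num * num
--         squares.append(square)
--
--         if square % 2 == 0:
--             even_squares.append(square)
--         else:
--             odd_squares.append(square)
--
--     return even_squares, odd_squares
-- ===== SOURCE B (Python) =====
-- def square_it_out(start, end):
--     # n*n is even iff n is even, so partition the range by n's parity
--     # with two strided passes instead of one branching loop.
--     first_even = start + start % 2
--     first_odd = start + (start + 1) % 2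
--     even_squares = [n * n for n in range(first_even, end + 1, 2)]
--     odd_squares = [n * n for n in range(first_odd, end + 1, 2)]
--     return even_squares, odd_squares
-- ===== Notes on version B (the rewrite author's own statement) =====
-- stated objective: idiomatic
-- what changed: Replaces the single loop that squares every number and branches on the square's parity with two branch-free strided comprehensions (step-2 ranges starting at the first even/odd integer >= start), using the fact that n*n is even iff n is even.
import Mathlib
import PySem

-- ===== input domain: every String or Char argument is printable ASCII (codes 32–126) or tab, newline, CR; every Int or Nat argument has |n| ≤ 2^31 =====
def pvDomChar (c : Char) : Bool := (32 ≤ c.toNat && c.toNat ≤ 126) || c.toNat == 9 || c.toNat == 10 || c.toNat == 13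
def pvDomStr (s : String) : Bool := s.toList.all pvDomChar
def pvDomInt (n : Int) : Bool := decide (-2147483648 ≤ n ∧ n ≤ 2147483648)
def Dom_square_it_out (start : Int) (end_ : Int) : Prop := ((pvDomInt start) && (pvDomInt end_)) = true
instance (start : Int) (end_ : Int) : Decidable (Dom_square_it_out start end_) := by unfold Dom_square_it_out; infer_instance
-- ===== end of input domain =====

-- B replaces A's single branching loop with two branch-free strided (step-2) passes,
-- one per parity, using the fact that n*n is even iff n is even (return value only; A's
-- unused `squares` list is kept in the port of A).


-- ===== PORT A =====
-- loop body of A: append the square to `squares` and to the even or odd list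
def stepA (acc : List Int × List Int × List Int) (num : Int) : List Int × List Int × List Int :=
  let square := num * num
  let squares := acc.1 ++ [square]
  if PySem.Int.mod square 2 = 0 then
    (squares, acc.2.1 ++ [square], acc.2.2)
  else
    (squares, acc.2.1, acc.2.2 ++ [square])

def square_it_out (start : Int) (end_ : Int) : List Int × List Int :=
  let st := (PySem.List.pyRange start (end_ + 1) 1).foldl stepA ([], [], [])
  (st.2.1, st.2.2)

-- ===== PORT B =====
def square_it_out_alt (start : Int) (end_ : Int) : List Int × List Int :=
  let firstEven := start + PySem.Int.mod start 2
  let firstOdd := start + PySem.Int.mod (start + 1) 2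
  ((PySem.List.pyRange firstEven (end_ + 1) 2).map (fun n => n * n),
   (PySem.List.pyRange firstOdd (end_ + 1) 2).map (fun n => n * n))

-- ===== PRECONDITION & SPEC =====
def Spec_square_it_out (start : Int) (end_ : Int) (out : List Int × List Int) : Prop := out = square_it_out_alt start end_
instance (start : Int) (end_ : Int) (out : List Int × List Int) : Decidable (Spec_square_it_out start end_ out) := by unfold Spec_square_it_out; infer_instance

-- ===== CLAIM (what is proved, stated in full; the proofs are below) =====
def Claim_equal_square_it_out : Prop := ∀ (start : Int) (end_ : Int), Dom_square_it_out start end_ → Spec_square_it_out start end_ (square_it_out start end_)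

-- ===== LEMMAS AND PROOFS =====

-- A's loop computes, besides all squares, the squares of the range filtered by parity of the square.
lemma foldlA (l : List Int) (s e o : List Int) :
    l.foldl stepA (s, e, o)
    = (s ++ l.map (fun n => n * n),
       e ++ (l.filter (fun n => PySem.Int.mod (n * n) 2 == 0)).map (fun n => n * n),
       o ++ (l.filter (fun n => !(PySem.Int.mod (n * n) 2 == 0))).map (fun n => n * n)) := by
  induction l generalizing s e o with
  | nil => simp
  | cons x xs ih =>
    rw [List.foldl_cons]
    by_cases h : PySem.Int.mod (x * x) 2 = 0
    · have hstep : stepA (s, e, o) x = (s ++ [x * x], e ++ [x * x], o) := by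
        simp only [stepA, if_pos h]
      rw [hstep, ih, List.filter_cons, List.filter_cons]
      have hb : ((PySem.Int.mod (x * x) 2 == 0) : Bool) = true := by rw [h]; rfl
      rw [if_pos hb, if_neg (by rw [hb]; simp)]
      simp
    · have hstep : stepA (s, e, o) x = (s ++ [x * x], e, o ++ [x * x]) := by
        simp only [stepA, if_neg h]
      rw [hstep, ih, List.filter_cons, List.filter_cons]
      have hb : ((PySem.Int.mod (x * x) 2 == 0) : Bool) = false :=
        beq_eq_false_iff_ne.mpr h
      rw [if_neg (by rw [hb]; simp), if_pos (by rw [hb]; rfl)]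
      simp

lemma mod2_eq_emod (x : Int) : PySem.Int.mod x 2 = x % 2 :=
  PySem.Int.mod_eq_emod_of_pos (by norm_num)

lemma mod_sq_two (n : Int) : PySem.Int.mod (n * n) 2 = PySem.Int.mod n 2 := by
  rw [mod2_eq_emod, mod2_eq_emod, Int.mul_emod]
  rcases Int.emod_two_eq n with h | h <;> rw [h] <;> norm_num

lemma pyRange_pos_nil (a b s : Int) (hs : 0 < s) (h : b ≤ a) : PySem.List.pyRange a b s = [] := by
  rw [PySem.List.pyRange_of_pos a b hs, if_neg (by omega)]
  simp

lemma pyRange_two_cons (a b : Int) (h : a < b) :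
    PySem.List.pyRange a b 2 = a :: PySem.List.pyRange (a + 2) b 2 := by
  rw [PySem.List.pyRange_of_pos a b (by norm_num),
      PySem.List.pyRange_of_pos (a + 2) b (by norm_num), if_pos h]
  have hn : ((b - a + 2 - 1) / 2).toNat
      = (if a + 2 < b then ((b - (a + 2) + 2 - 1) / 2).toNat else 0) + 1 := by
    split <;> omega
  rw [hn, List.range_succ_eq_map, List.map_cons, List.map_map]
  congr 1
  · norm_num
  · apply List.map_congr_left
    intro k _
    simp only [Function.comp_apply]
    push_cast
    ring

-- the even elements of range(a, b) form range(a + a%2, b, 2)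
lemma filter_even_pyRange (a b : Int) :
    (PySem.List.pyRange a b 1).filter (fun x => PySem.Int.mod x 2 == 0)
      = PySem.List.pyRange (a + PySem.Int.mod a 2) b 2 := by
  by_cases hab : b ≤ a
  · rw [PySem.List.pyRange_one_eq_nil hab, pyRange_pos_nil _ _ _ (by norm_num)
      (by have := mod2_eq_emod a; omega)]
    simp
  · rw [not_le] at hab
    rw [PySem.List.pyRange_one_cons hab, List.filter_cons]
    rcases PySem.Int.mod_two_eq a with h | h
    · have h1 : PySem.Int.mod (a + 1) 2 = 1 := by
        have := mod2_eq_emod a; have := mod2_eq_emod (a + 1); omega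
      have hpa : ((PySem.Int.mod a 2 == 0) : Bool) = true := by rw [h]; rfl
      rw [if_pos hpa, filter_even_pyRange (a + 1) b, h1]
      have e2 : a + 1 + 1 = a + 2 := by ring
      rw [e2, h, add_zero, ← pyRange_two_cons a b hab]
    · have h1 : PySem.Int.mod (a + 1) 2 = 0 := by
        have := mod2_eq_emod a; have := mod2_eq_emod (a + 1); omega
      have hpa : ¬ (((PySem.Int.mod a 2 == 0) : Bool) = true) := by rw [h]; simp
      rw [if_neg hpa, filter_even_pyRange (a + 1) b, h1, add_zero, h]
termination_by (b - a).toNat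
decreasing_by all_goals omega

-- the odd elements of range(a, b) form range(a + (a+1)%2, b, 2)
lemma filter_odd_pyRange (a b : Int) :
    (PySem.List.pyRange a b 1).filter (fun x => !(PySem.Int.mod x 2 == 0))
      = PySem.List.pyRange (a + PySem.Int.mod (a + 1) 2) b 2 := by
  by_cases hab : b ≤ a
  · rw [PySem.List.pyRange_one_eq_nil hab, pyRange_pos_nil _ _ _ (by norm_num)
      (by have := mod2_eq_emod (a + 1); omega)]
    simp
  · rw [not_le] at hab
    rw [PySem.List.pyRange_one_cons hab, List.filter_cons]
    rcases PySem.Int.mod_two_eq a with h | h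
    · have h1 : PySem.Int.mod (a + 1) 2 = 1 := by
        have := mod2_eq_emod a; have := mod2_eq_emod (a + 1); omega
      have h2 : PySem.Int.mod (a + 1 + 1) 2 = 0 := by
        have := mod2_eq_emod a; have := mod2_eq_emod (a + 1 + 1); omega
      have hpa : ¬ ((!(PySem.Int.mod a 2 == 0) : Bool) = true) := by rw [h]; simp
      rw [if_neg hpa, filter_odd_pyRange (a + 1) b, h2, add_zero, h1]
    · have h1 : PySem.Int.mod (a + 1) 2 = 0 := by
        have := mod2_eq_emod a; have := mod2_eq_emod (a + 1); omega
      have h2 : PySem.Int.mod (a + 1 + 1) 2 = 1 := by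
        have := mod2_eq_emod a; have := mod2_eq_emod (a + 1 + 1); omega
      have hpa : ((!(PySem.Int.mod a 2 == 0) : Bool) = true) := by rw [h]; rfl
      rw [if_pos hpa, filter_odd_pyRange (a + 1) b, h2]
      have e2 : a + 1 + 1 = a + 2 := by ring
      rw [e2, h1, add_zero, ← pyRange_two_cons a b hab]
termination_by (b - a).toNat
decreasing_by all_goals omega

-- ===== VERDICT (by name: the statement is the Claim_ definition above) =====
theorem square_it_out_spec : Claim_equal_square_it_out := by
  intro start end_ _
  unfold Spec_square_it_out square_it_out square_it_out_alt
  rw [foldlA]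
  have he : (fun n => ((PySem.Int.mod (n * n) 2 == 0) : Bool)) = (fun n : Int => PySem.Int.mod n 2 == 0) := by
    funext n; rw [mod_sq_two]
  have ho : (fun n => (!(PySem.Int.mod (n * n) 2 == 0) : Bool)) = (fun n : Int => !(PySem.Int.mod n 2 == 0)) := by
    funext n; rw [mod_sq_two]
  rw [he, ho, filter_even_pyRange, filter_odd_pyRange]
  rfl
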